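-- pv_equiv track=rewrite | github.com/flywinged/galactic-factorio | generationScript.py | determineGrid
-- ===== SOURCE A (Python) =====
-- GRIDS = [
--
--     #  All filled or all empty
--     [[False, False], [False, False]], # 0 none
--     [[True, True], [True, True]], # 1 all
--
--     #  One missing
--     [[False, True], [True, True]], # 2 top left
--     [[True, False], [True, True]], # 3 top right
--     [[True, True], [True, False]], # 4 bot right
--     [[True, True], [False, True]], # 5 bot left
--
--     #  Two missing
--     [[True, False], [True, False]], # 6 left
--     [[True, True], [False, False]], # 7 top
--     [[False, True], [False, True]], # 8 right
--     [[False, False], [True, True]], # 9 bottom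
--
--     [[True, False], [False, True]], # 10 Cross Negative
--     [[False, True], [True, False]], # 11 Cross Positive
--
--     # Three Missing
--     [[True, False], [False, False]], # 12 top left
--     [[False, True], [False, False]], # 13 top right
--     [[False, False], [False, True]], # 14 bot right
--     [[False, False], [True, False]]  # 15 bot left
--
--
-- ]
--
-- def determineGrid(grid):
--
--     for i in range(len(GRIDS)):
--         compare = GRIDS[i]
--
--         match = True
--         for x in range(2):
--             for y in range(2):
--                 if grid[x][y] != compare[x][y]:
--                     match = False
--
--         if match:
--             return i
-- ===== SOURCE B (Python) =====
-- # Index of each template, addressed by the 4-bit code 8*g00 + 4*g01 + 2*g10 + g11.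
-- INDEX_BY_CODE = [0, 14, 15, 9, 13, 8, 11, 2, 12, 10, 6, 3, 7, 5, 4, 1]
--
-- def determineGrid(grid):
--     code = 8 * bool(grid[0][0]) + 4 * bool(grid[0][1]) + 2 * bool(grid[1][0]) + bool(grid[1][1])
--     return INDEX_BY_CODE[code]
-- ===== Notes on version B (the rewrite author's own statement) =====
-- stated objective: simpler
-- what changed: Replaced the linear scan over GRIDS with nested cell comparisons by an arithmetic encoding: the four cells are packed into a 4-bit code and a 16-entry permutation table maps the code to the template index; no templates are stored or compared. Pre_ excludes grids lacking the 2x2 cells, on which both raise IndexError.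
import Mathlib
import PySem

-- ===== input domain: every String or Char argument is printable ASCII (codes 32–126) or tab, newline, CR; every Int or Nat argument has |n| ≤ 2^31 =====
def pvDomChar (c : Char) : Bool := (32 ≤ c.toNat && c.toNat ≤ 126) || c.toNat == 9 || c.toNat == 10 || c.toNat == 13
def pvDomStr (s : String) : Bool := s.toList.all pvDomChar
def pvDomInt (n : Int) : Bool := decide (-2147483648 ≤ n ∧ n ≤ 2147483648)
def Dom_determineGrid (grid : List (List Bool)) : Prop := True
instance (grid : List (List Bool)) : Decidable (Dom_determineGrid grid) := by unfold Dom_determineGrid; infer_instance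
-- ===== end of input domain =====

-- B replaces A's scan over the GRIDS templates by an arithmetic encoding: the four
-- cells are packed into a 4-bit code indexing a permutation table (objective: simpler).

-- ===== PORT A =====
def pvGRIDS : List (List (List Bool)) := [
  [[false, false], [false, false]],
  [[true, true], [true, true]],
  [[false, true], [true, true]],
  [[true, false], [true, true]],
  [[true, true], [true, false]],
  [[true, true], [false, true]],
  [[true, false], [true, false]],
  [[true, true], [false, false]],
  [[false, true], [false, true]],
  [[false, false], [true, true]],
  [[true, false], [false, true]],
  [[false, true], [true, false]],
  [[true, false], [false, false]],
  [[false, true], [false, false]],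
  [[false, false], [false, true]],
  [[false, false], [true, false]]]

-- grid[x][y] (none = IndexError; Pre_ excludes the none case)
def pvCell (g : List (List Bool)) (x y : Int) : Option Bool :=
  (PySem.List.pyGet? g x).bind (fun r => PySem.List.pyGet? r y)

-- the inner 'for x / for y' match check; comparing the Option values is exact inside Pre_
def pvMatch (grid compare : List (List Bool)) : Bool :=
  [(0, 0), (0, 1), (1, 0), (1, 1)].foldl
    (fun m (xy : Int × Int) =>
      if pvCell grid xy.1 xy.2 ≠ pvCell compare xy.1 xy.2 then false else m)
    true

def pvLoopA (grid : List (List Bool)) : List Int → Option Int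
  | [] => none
  | i :: rest =>
    let compare := (PySem.List.pyGet? pvGRIDS i).getD []
    if pvMatch grid compare then some i else pvLoopA grid rest

def determineGrid (grid : List (List Bool)) : Option Int :=
  pvLoopA grid (PySem.List.pyRange 0 (pvGRIDS.length) 1)

-- ===== PORT B =====
-- INDEX_BY_CODE of Source B: template index addressed by the 4-bit code 8*g00+4*g01+2*g10+g11
def pvINDEX_BY_CODE : List Int := [0, 14, 15, 9, 13, 8, 11, 2, 12, 10, 6, 3, 7, 5, 4, 1]

-- the four indexings grid[0][0], grid[0][1], grid[1][0], grid[1][1] (none = IndexError)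
def pvCells (g : List (List Bool)) : Option (Bool × Bool × Bool × Bool) := do
  let r0 ← PySem.List.pyGet? g 0
  let a ← PySem.List.pyGet? r0 0
  let b ← PySem.List.pyGet? r0 1
  let r1 ← PySem.List.pyGet? g 1
  let c ← PySem.List.pyGet? r1 0
  let d ← PySem.List.pyGet? r1 1
  pure (a, b, c, d)

def determineGrid_alt (grid : List (List Bool)) : Option Int :=
  match pvCells grid with
  | none => none
  | some (a, b, c, d) =>
    let code : Int := 8 * (if a then 1 else 0) + 4 * (if b then 1 else 0)
      + 2 * (if c then 1 else 0) + (if d then 1 else 0)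
    PySem.List.pyGet? pvINDEX_BY_CODE code

-- ===== PRECONDITION & SPEC =====
-- Pre_ : Python A indexes grid[0][0], grid[0][1], grid[1][0], grid[1][1]; on grids
-- without these cells both A and B raise IndexError, so exactly those are excluded.
def Pre_determineGrid (grid : List (List Bool)) : Prop :=
  2 ≤ grid.length ∧ ∀ r ∈ grid.take 2, 2 ≤ r.length
instance (grid : List (List Bool)) : Decidable (Pre_determineGrid grid) := by
  unfold Pre_determineGrid; infer_instance

def pvWitness_determineGrid : List (List Bool) := [[true, false], [false, true]]

def Spec_determineGrid (grid : List (List Bool)) (out : Option Int) : Prop := out = determineGrid_alt grid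
instance (grid : List (List Bool)) (out : Option Int) : Decidable (Spec_determineGrid grid out) := by unfold Spec_determineGrid; infer_instance

-- ===== CLAIM (what is proved, stated in full; the proofs are below) =====
def Claim_equal_determineGrid : Prop := ∀ (grid : List (List Bool)), Dom_determineGrid grid → Pre_determineGrid grid → Spec_determineGrid grid (determineGrid grid)

-- ===== LEMMAS AND PROOFS =====

theorem cell00 (a b c d : Bool) (t0 t1 : List Bool) (rest : List (List Bool)) :
    pvCell ((a :: b :: t0) :: (c :: d :: t1) :: rest) 0 0 = some a := by
  have h : (0:Int) ≤ (rest.length:Int) + 1 := by positivity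
  simp [pvCell, PySem.List.pyGet?, PySem.List.pyIdx?, h]

theorem cell01 (a b c d : Bool) (t0 t1 : List Bool) (rest : List (List Bool)) :
    pvCell ((a :: b :: t0) :: (c :: d :: t1) :: rest) 0 1 = some b := by
  have h : (0:Int) ≤ (rest.length:Int) + 1 := by positivity
  simp [pvCell, PySem.List.pyGet?, PySem.List.pyIdx?, h]

theorem cell10 (a b c d : Bool) (t0 t1 : List Bool) (rest : List (List Bool)) :
    pvCell ((a :: b :: t0) :: (c :: d :: t1) :: rest) 1 0 = some c := by
  have h : (1:Int) < (rest.length:Int) + 1 + 1 := by omega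
  simp [pvCell, PySem.List.pyGet?, PySem.List.pyIdx?, h]

theorem cell11 (a b c d : Bool) (t0 t1 : List Bool) (rest : List (List Bool)) :
    pvCell ((a :: b :: t0) :: (c :: d :: t1) :: rest) 1 1 = some d := by
  have h : (1:Int) < (rest.length:Int) + 1 + 1 := by omega
  simp [pvCell, PySem.List.pyGet?, PySem.List.pyIdx?, h]

-- pvMatch reads only the four corner cells
theorem pvMatch_congr (a b c d : Bool) (t0 t1 : List Bool) (rest : List (List Bool))
    (cmp : List (List Bool)) :
    pvMatch ((a :: b :: t0) :: (c :: d :: t1) :: rest) cmp = pvMatch ([[a,b],[c,d]]) cmp := by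
  simp only [pvMatch, List.foldl, cell00, cell01, cell10, cell11]

theorem pvLoopA_congr (a b c d : Bool) (t0 t1 : List Bool) (rest : List (List Bool))
    (L : List Int) :
    pvLoopA ((a :: b :: t0) :: (c :: d :: t1) :: rest) L = pvLoopA ([[a,b],[c,d]]) L := by
  induction L with
  | nil => rfl
  | cons i L ih => simp only [pvLoopA, pvMatch_congr, ih]

theorem pvCells_shape (a b c d : Bool) (t0 t1 : List Bool) (rest : List (List Bool)) :
    pvCells ((a :: b :: t0) :: (c :: d :: t1) :: rest) = some (a, b, c, d) := by
  have h : (1:Int) < (rest.length:Int) + 1 + 1 := by omega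
  have h2 : (0:Int) ≤ (rest.length:Int) + 1 := by positivity
  simp [pvCells, PySem.List.pyGet?, PySem.List.pyIdx?, h, h2]

theorem determineGrid_core (a b c d : Bool) (t0 t1 : List Bool) (rest : List (List Bool)) :
    determineGrid ((a :: b :: t0) :: (c :: d :: t1) :: rest)
      = determineGrid_alt ((a :: b :: t0) :: (c :: d :: t1) :: rest) := by
  rw [determineGrid, pvLoopA_congr,
      show determineGrid_alt ((a :: b :: t0) :: (c :: d :: t1) :: rest)
        = determineGrid_alt ([[a,b],[c,d]]) from by
          rw [determineGrid_alt, determineGrid_alt, pvCells_shape]; rfl]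
  cases a <;> cases b <;> cases c <;> cases d <;> decide

-- ===== VERDICT (by name: the statement is the Claim_ definition above) =====
theorem determineGrid_spec : Claim_equal_determineGrid := by
  intro grid _ hpre
  unfold Spec_determineGrid
  obtain ⟨hlen, hrows⟩ := hpre
  match grid, hlen, hrows with
  | r0 :: r1 :: rest, _, hrows =>
    have h0 : 2 ≤ r0.length := hrows r0 (by simp)
    have h1 : 2 ≤ r1.length := hrows r1 (by simp)
    match r0, h0, r1, h1 with
    | a :: b :: t0, _, c :: d :: t1, _ =>
      exact determineGrid_core a b c d t0 t1 rest
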